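-- pv_equiv track=rewrite | github.com/groverneev/Programming-Projects | Alpha Star USACO Bronze Part A,B/RoundabountRounding.py | count_different_roundings
-- ===== SOURCE A (Python) =====
-- def count_different_roundings(T, test_cases):
--     results = []
--     for N in test_cases:
--         count = 0
--         for x in range(2, N + 1):
--             # Chain rounding
--             chain_rounded = x
--             power = 10
--             while power <= x:
--                 if (chain_rounded % power) >= (power // 2):
--                     chain_rounded = (chain_rounded // power + 1) * power
--                 else:
--                     chain_rounded = (chain_rounded // power) * power
--                 power *= 10
--
--             # Regular rounding directly to the nearest 10^P
--             P = 1
--             while P <= x: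
--                 P *= 10
--             regular_rounded = (x + (P // 2)) // P * P
--
--             # Compare the two results
--             if chain_rounded != regular_rounded:
--                 count += 1
--
--         results.append(count)
--
--     return results
-- ===== SOURCE B (Python) =====
-- def count_different_roundings(T, test_cases):
--     # Sweep x = 2..max(test_cases) once, maintaining a running prefix count of
--     # "chain rounding != direct rounding", and record the running count at each
--     # queried N; then answer every test case by lookup.
--     if not test_cases:
--         return []
--     hi = max(test_cases)
--     queries = set(test_cases)
--     answers = {}
--     running = 0
--     for x in range(2, hi + 1):
--         # one merged loop: chain-round v upward through the powers of 10,
--         # leaving `power` as the smallest power of 10 exceeding x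
--         v = x
--         power = 10
--         while power <= x:
--             q, r = divmod(v, power)
--             v = (q + (1 if 2 * r >= power else 0)) * power
--             power *= 10
--         if v != (power if 2 * x >= power else 0):
--             running += 1
--         if x in queries:
--             answers[x] = running
--     return [answers.get(N, 0) for N in test_cases]
-- ===== Notes on version B (the rewrite author's own statement) =====
-- stated objective: faster
-- what changed: Instead of re-counting the whole range [2,N] for every test case, B sweeps x from 2 to max(test_cases) once, maintaining a running prefix count and recording it at queried values, then answers all test cases by dictionary lookup; it also merges A's two per-x power-of-10 loops into one.
import Mathlib
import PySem

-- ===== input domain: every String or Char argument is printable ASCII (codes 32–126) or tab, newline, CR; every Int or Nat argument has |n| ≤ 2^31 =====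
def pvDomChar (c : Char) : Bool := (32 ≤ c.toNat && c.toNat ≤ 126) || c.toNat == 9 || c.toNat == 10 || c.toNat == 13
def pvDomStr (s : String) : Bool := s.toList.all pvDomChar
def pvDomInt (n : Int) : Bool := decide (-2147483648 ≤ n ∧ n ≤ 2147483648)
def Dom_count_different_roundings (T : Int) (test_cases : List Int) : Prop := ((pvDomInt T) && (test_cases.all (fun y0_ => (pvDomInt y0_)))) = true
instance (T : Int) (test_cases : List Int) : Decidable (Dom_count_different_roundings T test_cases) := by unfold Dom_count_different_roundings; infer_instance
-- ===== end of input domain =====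

-- B answers all queries from ONE prefix-count sweep up to max(test_cases) (and merges the
-- two per-x power loops), instead of A's full re-count for every test case.

-- ===== PORT A =====
-- while power <= x: round chain at power; power *= 10   (the Nat fuel only makes the
-- loop total; it is always sufficient, since power at least doubles each iteration)
def chainLoopA (x : Int) : Nat → Int → Int → Int
  | 0, chain, _ => chain
  | fuel + 1, chain, power =>
    if power ≤ x then
      chainLoopA x fuel
        (if PySem.Int.mod chain power ≥ PySem.Int.floordiv power 2
          then (PySem.Int.floordiv chain power + 1) * power
          else (PySem.Int.floordiv chain power) * power)
        (power * 10)
    else chain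

-- while P <= x: P *= 10   (fuel as above)
def powLoopA (x : Int) : Nat → Int → Int
  | 0, P => P
  | fuel + 1, P => if P ≤ x then powLoopA x fuel (P * 10) else P

def count_different_roundings (T : Int) (test_cases : List Int) : List Int :=
  test_cases.foldl (fun results N =>
    results ++ [((PySem.List.pyRange 2 (N + 1)).foldl (fun count x =>
      let chain := chainLoopA x (x.toNat + 1) x 10
      let P := powLoopA x (x.toNat + 2) 1
      let regular := PySem.Int.floordiv (x + PySem.Int.floordiv P 2) P * P
      if chain ≠ regular then count + 1 else count) 0)]) []

-- ===== PORT B =====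
-- merged loop: chain-round v upward; on exit power is the first power of 10 above x
-- (the Nat fuel only makes the loop total, as in port A)
def chainLoopB (x : Int) : Nat → Int → Int → Int × Int
  | 0, v, power => (v, power)
  | fuel + 1, v, power =>
    if power ≤ x then
      chainLoopB x fuel
        ((PySem.Int.floordiv v power
          + (if 2 * PySem.Int.mod v power ≥ power then 1 else 0)) * power)
        (power * 10)
    else (v, power)

def diffB (x : Int) : Bool :=
  let vp := chainLoopB x (x.toNat + 1) x 10
  vp.1 != (if 2 * x ≥ vp.2 then vp.2 else 0)

def sweepStep (queries : PySem.Set Int) (st : PySem.Dict Int Int × Int) (x : Int) :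
    PySem.Dict Int Int × Int :=
  let running := st.2 + (if diffB x then 1 else 0)
  ((if PySem.Set.contains queries x then st.1.insert x running else st.1), running)

def count_different_roundings_alt (T : Int) (test_cases : List Int) : List Int :=
  match test_cases with
  | [] => []
  | N0 :: rest =>
    let hi := ((PySem.List.max? (N0 :: rest) (fun y => y)).getD 0)
    let queries := PySem.Set.ofList (N0 :: rest)
    let st := (PySem.List.pyRange 2 (hi + 1)).foldl (sweepStep queries) (PySem.Dict.empty, 0)
    (N0 :: rest).map (fun N => st.1.getD N 0)

-- ===== PRECONDITION & SPEC =====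
def Spec_count_different_roundings (T : Int) (test_cases : List Int) (out : List Int) : Prop := out = count_different_roundings_alt T test_cases
instance (T : Int) (test_cases : List Int) (out : List Int) : Decidable (Spec_count_different_roundings T test_cases out) := by unfold Spec_count_different_roundings; infer_instance

-- ===== CLAIM (what is proved, stated in full; the proofs are below) =====
def Claim_equal_count_different_roundings : Prop := ∀ (T : Int) (test_cases : List Int), Dom_count_different_roundings T test_cases → Spec_count_different_roundings T test_cases (count_different_roundings T test_cases)

-- ===== LEMMAS AND PROOFS =====

-- the prefix count B maintains: number of x in [2, t) whose two roundings differ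
def prefCnt (t : Int) : Int := ((PySem.List.pyRange 2 t).countP diffB : Int)

-- the chain value computed by both ports agrees (for even power)
theorem chain_eq (x : Int) : ∀ (n : Nat) (v p : Int), 2 ∣ p →
    chainLoopA x n v p = (chainLoopB x n v p).1 := by
  intro n
  induction n with
  | zero => intro v p _; rfl
  | succ n ih =>
    intro v p hp
    rw [chainLoopA, chainLoopB]
    by_cases h : p ≤ x
    · rw [if_pos h, if_pos h]
      obtain ⟨m, hm⟩ := hp
      have h2 : PySem.Int.floordiv p 2 = m := by
        rw [PySem.Int.floordiv_eq_iff_of_pos (by omega)]; omega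
      have harg : (if PySem.Int.mod v p ≥ PySem.Int.floordiv p 2
          then (PySem.Int.floordiv v p + 1) * p else (PySem.Int.floordiv v p) * p)
        = (PySem.Int.floordiv v p
            + (if 2 * PySem.Int.mod v p ≥ p then 1 else 0)) * p := by
        rw [h2]
        by_cases hc : 2 * PySem.Int.mod v p ≥ p
        · rw [if_pos (by omega), if_pos hc]
        · rw [if_neg (by omega), if_neg hc]; ring
      rw [harg]
      exact ih _ _ ⟨m * 10, by omega⟩
    · rw [if_neg h, if_neg h]

-- the power component of B's merged loop is A's P loop
theorem pow_eq (x : Int) : ∀ (n : Nat) (v p : Int),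
    (chainLoopB x n v p).2 = powLoopA x n p := by
  intro n
  induction n with
  | zero => intro v p; rfl
  | succ n ih =>
    intro v p
    rw [chainLoopB, powLoopA]
    by_cases h : p ≤ x
    · rw [if_pos h, if_pos h]; exact ih _ _
    · rw [if_neg h, if_neg h]

-- invariant of the power loop: result exceeds x, is even and positive
theorem pow_inv (x : Int) : ∀ (n : Nat) (p : Int), (x + 1 - p).toNat ≤ n → 0 < p →
    (2 ∣ p ∨ p ≤ x) → x < powLoopA x n p ∧ 2 ∣ powLoopA x n p ∧ 0 < powLoopA x n p := by
  intro n
  induction n with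
  | zero =>
    intro p hn hpos hd
    show x < p ∧ 2 ∣ p ∧ 0 < p
    refine ⟨by omega, ?_, hpos⟩
    rcases hd with hd | hd
    · exact hd
    · omega
  | succ n ih =>
    intro p hn hpos hd
    rw [powLoopA]
    by_cases h : p ≤ x
    · rw [if_pos h]
      exact ih _ (by omega) (by omega) (Or.inl ⟨p * 5, by ring⟩)
    · rw [if_neg h]
      refine ⟨by omega, ?_, hpos⟩
      rcases hd with hd | hd
      · exact hd
      · omega

-- direct rounding to the nearest P (half up) is just a half-way test when x < P
theorem regular_closed (x P : Int) (hx : 0 < x) (hxP : x < P) (hP : 2 ∣ P) :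
    PySem.Int.floordiv (x + PySem.Int.floordiv P 2) P * P = if 2 * x ≥ P then P else 0 := by
  obtain ⟨m, hm⟩ := hP
  have h2 : PySem.Int.floordiv P 2 = m := by
    rw [PySem.Int.floordiv_eq_iff_of_pos (by omega)]; omega
  rw [h2]
  by_cases hge : 2 * x ≥ P
  · have h1 : PySem.Int.floordiv (x + m) P = 1 := by
      rw [PySem.Int.floordiv_eq_iff_of_pos (by omega)]
      constructor <;> omega
    rw [h1, if_pos hge, one_mul]
  · have h0 : PySem.Int.floordiv (x + m) P = 0 := by
      rw [PySem.Int.floordiv_eq_iff_of_pos (by omega)]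
      constructor <;> omega
    rw [h0, if_neg hge, zero_mul]

-- A's per-x comparison is B's diffB
theorem diff_eq (x : Int) (hx : 2 ≤ x) :
    (chainLoopA x (x.toNat + 1) x 10 ≠
      PySem.Int.floordiv (x + PySem.Int.floordiv (powLoopA x (x.toNat + 2) 1) 2)
        (powLoopA x (x.toNat + 2) 1) * powLoopA x (x.toNat + 2) 1)
    ↔ diffB x = true := by
  have hpow1 : powLoopA x (x.toNat + 2) 1 = powLoopA x (x.toNat + 1) 10 := by
    show powLoopA x (x.toNat + 1 + 1) 1 = _
    rw [powLoopA, if_pos (by omega : (1:Int) ≤ x)]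
    norm_num
  have hinv := pow_inv x (x.toNat + 1) 10 (by omega) (by omega) (Or.inl ⟨5, by ring⟩)
  obtain ⟨hlt, hdvd, hposP⟩ := hinv
  rw [hpow1]
  rw [regular_closed x _ (by omega) hlt hdvd]
  rw [chain_eq x (x.toNat + 1) x 10 ⟨5, by ring⟩]
  rw [← pow_eq x (x.toNat + 1) x 10]
  simp only [diffB, bne_iff_ne, ne_eq]

-- A's inner loop counts diffB over [2, N]
theorem countA_eq (N : Int) :
    ((PySem.List.pyRange 2 (N + 1)).foldl (fun count x =>
      let chain := chainLoopA x (x.toNat + 1) x 10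
      let P := powLoopA x (x.toNat + 2) 1
      let regular := PySem.Int.floordiv (x + PySem.Int.floordiv P 2) P * P
      if chain ≠ regular then count + 1 else count) 0) = prefCnt (N + 1) := by
  rw [PySem.List.foldl_congr_mem _ _
    (fun count x => if diffB x = true then count + 1 else count) 0
    (by
      intro acc x hx
      have hx2 : 2 ≤ x := (PySem.List.mem_pyRange_one.mp hx).1
      exact if_congr (diff_eq x hx2) rfl rfl)]
  rw [PySem.List.foldl_ite_add_one (fun x => diffB x = true)]
  simp [prefCnt]

theorem prefCnt_succ (a : Int) (ha : 2 ≤ a) :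
    prefCnt (a + 1) = prefCnt a + (if diffB a then 1 else 0) := by
  rw [prefCnt, prefCnt, PySem.List.pyRange_one_succ_right (by omega : (2:Int) ≤ a),
    List.countP_append]
  by_cases hd : diffB a = true <;> simp [hd]

-- keys inserted later than N never change N's lookup
theorem sweep_preserve (qs : PySem.Set Int) (N : Int) :
    ∀ (L : List Int), (∀ y ∈ L, N < y) → ∀ (d : PySem.Dict Int Int) (c : Int),
    ((L.foldl (sweepStep qs) (d, c)).1).getD N 0 = d.getD N 0 := by
  intro L
  induction L with
  | nil => intro _ d c; rfl
  | cons y L ih =>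
    intro hy d c
    simp only [List.foldl_cons]
    rw [show sweepStep qs (d, c) y
        = ((sweepStep qs (d, c) y).1, (sweepStep qs (d, c) y).2) from rfl]
    rw [ih (fun z hz => hy z (List.mem_cons_of_mem _ hz))]
    have hNy : N ≠ y := by have := hy y (List.mem_cons_self ..); omega
    simp only [sweepStep]
    by_cases hc : PySem.Set.contains qs y = true
    · rw [if_pos hc, PySem.Dict.getD_insert_of_ne _ _ _ hNy]
    · rw [if_neg hc]

-- main sweep invariant
theorem sweep_main (qs : PySem.Set Int) (hi : Int) :
    ∀ (n : Nat) (a : Int) (d : PySem.Dict Int Int) (c : Int) (N : Int),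
      (hi + 1 - a).toNat ≤ n → 2 ≤ a → a ≤ N → N ≤ hi →
      PySem.Set.contains qs N = true → c = prefCnt a →
      (((PySem.List.pyRange a (hi + 1)).foldl (sweepStep qs) (d, c)).1).getD N 0
        = prefCnt (N + 1) := by
  intro n
  induction n with
  | zero => intro a d c N hn ha haN hNhi _ _; exfalso; omega
  | succ n ih =>
    intro a d c N hn ha haN hNhi hqs hc
    rw [PySem.List.pyRange_one_cons (by omega : a < hi + 1), List.foldl_cons]
    have hc' : (sweepStep qs (d, c) a).2 = prefCnt (a + 1) := by
      simp only [sweepStep, hc]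
      exact (prefCnt_succ a ha).symm
    by_cases hNa : N = a
    · subst hNa
      rw [show sweepStep qs (d, c) N
          = ((sweepStep qs (d, c) N).1, (sweepStep qs (d, c) N).2) from rfl]
      rw [sweep_preserve qs N _
        (by intro y hy; exact by have := (PySem.List.mem_pyRange_one.mp hy).1; omega)]
      have : (sweepStep qs (d, c) N).1 = d.insert N (prefCnt (N + 1)) := by
        simp only [sweepStep, hqs, if_pos, hc]
        rw [(prefCnt_succ N ha).symm]
      rw [this, PySem.Dict.getD_insert_self]
    · rw [show sweepStep qs (d, c) a
          = ((sweepStep qs (d, c) a).1, (sweepStep qs (d, c) a).2) from rfl]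
      rw [hc']
      exact ih (a + 1) _ _ N (by omega) (by omega) (by omega) hNhi hqs rfl

-- ===== VERDICT (by name: the statement is the Claim_ definition above) =====
theorem prefCnt_two : prefCnt 2 = 0 := by simp [prefCnt]

theorem prefCnt_lt (N : Int) (h : N < 2) : prefCnt (N + 1) = 0 := by
  have hnil : PySem.List.pyRange 2 (N + 1) = [] := by
    rw [List.eq_nil_iff_forall_not_mem]
    intro y hy
    have := PySem.List.mem_pyRange_one.mp hy
    omega
  simp [prefCnt, hnil]

theorem count_different_roundings_spec : Claim_equal_count_different_roundings := by
  intro T test_cases _hdom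
  show count_different_roundings T test_cases = count_different_roundings_alt T test_cases
  cases test_cases with
  | nil => rfl
  | cons N0 rest =>
    simp only [count_different_roundings, count_different_roundings_alt,
      PySem.List.foldl_append_singleton_eq_map, List.nil_append]
    cases hmax : PySem.List.max? (N0 :: rest) (fun y => y) with
    | none =>
      exact absurd ((PySem.List.max?_eq_none_iff _ _).mp hmax) (by simp)
    | some m =>
      simp only [Option.getD_some]
      have hle : ∀ y ∈ N0 :: rest, y ≤ m := PySem.List.max?_isMax hmax
      apply List.map_congr_left
      intro N hN
      rw [countA_eq N]
      by_cases h2 : 2 ≤ N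
      · have hcont : PySem.Set.contains (PySem.Set.ofList (N0 :: rest)) N = true := by
          simp [PySem.Set.contains, PySem.Set.mem_ofList, hN]
        exact (sweep_main (PySem.Set.ofList (N0 :: rest)) m (m + 1 - 2).toNat 2
          PySem.Dict.empty 0 N le_rfl le_rfl h2 (hle N hN) hcont prefCnt_two.symm).symm
      · rw [prefCnt_lt N (by omega)]
        rw [sweep_preserve (PySem.Set.ofList (N0 :: rest)) N _
          (by
            intro y hy
            have := (PySem.List.mem_pyRange_one.mp hy).1
            omega)]
        rw [PySem.Dict.getD_empty]
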